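-- pv_equiv track=rewrite | github.com/CERTABO/Nano | utils/remote_control.py | _row_0_to_8
-- ===== SOURCE A (Python) =====
-- def _row_0_to_8(row, piece="q", ignore_color=True):
--     """
--     Return integer between 1-8 depending on the placement of piece(queen) in a row, 0 if none
--     Used for epaper setting selection
--     """
--     if ignore_color:
--         row = row.lower()
--         piece = piece.lower()
--
--     for i in range(8):
--         prefix = ""
--         if i > 0:
--             prefix = i
--         suffix = ""
--         if i < 7:
--             suffix = 7 - i
--         if row == f"{prefix}{piece}{suffix}":
--             return i + 1
--     return 0
-- ===== SOURCE B (Python) =====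
-- def _row_0_to_8(row, piece="q", ignore_color=True):
--     """
--     Return integer between 1-8 depending on the placement of piece(queen) in a row, 0 if none
--     Used for epaper setting selection
--     """
--     if ignore_color:
--         row = row.lower()
--         piece = piece.lower()
--
--     # Direct parse instead of generating 8 candidates:
--     # the row is either piece+"7" (position 1) or a single digit i in 1..7,
--     # then piece, then the complementary digit 7-i (absent when i == 7).
--     if row == piece + "7":
--         return 1
--     if row and row[0] in "1234567":
--         i = int(row[0])
--         tail = piece if i == 7 else piece + str(7 - i)
--         if row[1:] == tail:
--             return i + 1
--     return 0
-- ===== Notes on version B (the rewrite author's own statement) =====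
-- stated objective: simpler
-- what changed: B parses the row directly (optional leading digit 1-7, then piece, then the complementary digit) instead of generating all 8 candidate strings in a loop and comparing each against the row.
import Mathlib
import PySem

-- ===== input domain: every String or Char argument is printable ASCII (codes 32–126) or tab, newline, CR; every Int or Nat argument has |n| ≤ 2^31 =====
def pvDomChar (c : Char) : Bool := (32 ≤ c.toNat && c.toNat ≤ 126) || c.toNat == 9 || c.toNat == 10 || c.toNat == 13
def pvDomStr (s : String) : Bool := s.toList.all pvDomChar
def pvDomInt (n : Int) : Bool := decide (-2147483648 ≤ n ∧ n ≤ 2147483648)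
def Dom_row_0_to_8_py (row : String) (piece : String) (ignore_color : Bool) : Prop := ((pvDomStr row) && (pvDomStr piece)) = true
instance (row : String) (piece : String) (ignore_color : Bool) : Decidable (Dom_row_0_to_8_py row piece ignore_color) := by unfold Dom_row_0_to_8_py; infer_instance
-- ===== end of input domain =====

-- B replaces A's "build all 8 candidate strings and compare" loop by a direct O(1) parse
-- of the row's first character (objective: simpler; no measured speed claim).

-- ===== PORT A =====
-- the 'for i in range(8)' loop with early return; string concat/equality modeled on char lists
def pvLoopA (rowL pieceL : List Char) : List Int → Int
  | [] => 0
  | i :: rest =>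
    let pre : List Char := if i > 0 then (PySem.Int.toStr i).toList else []
    let suf : List Char := if i < 7 then (PySem.Int.toStr (7 - i)).toList else []
    if rowL = pre ++ pieceL ++ suf then i + 1 else pvLoopA rowL pieceL rest

def row_0_to_8_py (row : String) (piece : String) (ignore_color : Bool) : Int :=
  let rowL := if ignore_color then PySem.Chars.lower row.toList else row.toList
  let pieceL := if ignore_color then PySem.Chars.lower piece.toList else piece.toList
  pvLoopA rowL pieceL (PySem.List.pyRange 0 8 1)

-- ===== PORT B =====
-- direct parse: row is either piece+"7", or digit i in 1..7, piece, complementary digit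
def pvParseB (rowL pieceL : List Char) : Int :=
  if rowL = pieceL ++ ['7'] then 1
  else
    match rowL with
    | [] => 0
    | c :: rest =>
      if (['1','2','3','4','5','6','7'] : List Char).contains c then
        let i : Int := (c.toNat : Int) - 48   -- int(row[0]) on a single digit char: exact
        let tail : List Char := if i = 7 then pieceL else pieceL ++ (PySem.Int.toStr (7 - i)).toList
        if rest = tail then i + 1 else 0
      else 0

def row_0_to_8_py_alt (row : String) (piece : String) (ignore_color : Bool) : Int :=
  let rowL := if ignore_color then PySem.Chars.lower row.toList else row.toList
  let pieceL := if ignore_color then PySem.Chars.lower piece.toList else piece.toList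
  pvParseB rowL pieceL

-- ===== PRECONDITION & SPEC =====
def Spec_row_0_to_8_py (row : String) (piece : String) (ignore_color : Bool) (out : Int) : Prop := out = row_0_to_8_py_alt row piece ignore_color
instance (row : String) (piece : String) (ignore_color : Bool) (out : Int) : Decidable (Spec_row_0_to_8_py row piece ignore_color out) := by unfold Spec_row_0_to_8_py; infer_instance

-- ===== CLAIM (what is proved, stated in full; the proofs are below) =====
def Claim_equal_row_0_to_8_py : Prop := ∀ (row : String) (piece : String) (ignore_color : Bool), Dom_row_0_to_8_py row piece ignore_color → Spec_row_0_to_8_py row piece ignore_color (row_0_to_8_py row piece ignore_color)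

-- ===== LEMMAS AND PROOFS =====

lemma pvLoop_eq_parse (r p : List Char) : pvLoopA r p (PySem.List.pyRange 0 8 1) = pvParseB r p := by
  have hrange : PySem.List.pyRange 0 8 1 = [0, 1, 2, 3, 4, 5, 6, 7] := by decide
  rw [hrange]
  have t1 : (PySem.Int.toStr 1).toList = ['1'] := by decide
  have t2 : (PySem.Int.toStr 2).toList = ['2'] := by decide
  have t3 : (PySem.Int.toStr 3).toList = ['3'] := by decide
  have t4 : (PySem.Int.toStr 4).toList = ['4'] := by decide
  have t5 : (PySem.Int.toStr 5).toList = ['5'] := by decide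
  have t6 : (PySem.Int.toStr 6).toList = ['6'] := by decide
  have t7 : (PySem.Int.toStr 7).toList = ['7'] := by decide
  have u1 : PySem.Int.toChars 1 = ['1'] := by decide
  have u2 : PySem.Int.toChars 2 = ['2'] := by decide
  have u3 : PySem.Int.toChars 3 = ['3'] := by decide
  have u4 : PySem.Int.toChars 4 = ['4'] := by decide
  have u5 : PySem.Int.toChars 5 = ['5'] := by decide
  have u6 : PySem.Int.toChars 6 = ['6'] := by decide
  have u7 : PySem.Int.toChars 7 = ['7'] := by decide
  simp only [pvLoopA, pvParseB]
  norm_num [t1, t2, t3, t4, t5, t6, t7, u1, u2, u3, u4, u5, u6, u7]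
  by_cases h0 : r = p ++ ['7']
  · simp [h0]
  · simp only [h0, if_false]
    cases r with
    | nil => simp
    | cons c rest =>
      by_cases hc1 : c = '1'
      · subst hc1; simp [u6]
      · by_cases hc2 : c = '2'
        · subst hc2; simp [u5]
        · by_cases hc3 : c = '3'
          · subst hc3; simp [u4]
          · by_cases hc4 : c = '4'
            · subst hc4; simp [u3]
            · by_cases hc5 : c = '5'
              · subst hc5; simp [u2]
              · by_cases hc6 : c = '6'
                · subst hc6; simp [u1]
                · by_cases hc7 : c = '7'
                  · subst hc7; simp
                  · simp [hc1, hc2, hc3, hc4, hc5, hc6, hc7]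

-- ===== VERDICT (by name: the statement is the Claim_ definition above) =====
theorem row_0_to_8_py_spec : Claim_equal_row_0_to_8_py := by
  intro row piece ic _
  unfold Spec_row_0_to_8_py row_0_to_8_py row_0_to_8_py_alt
  exact pvLoop_eq_parse _ _
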